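-- pv_equiv track=rewrite | github.com/nvt/veloxvm | languages/python/pyvelox/repl_service.py | _emit_string
-- ===== SOURCE A (Python) =====
-- def _emit_string(s: str) -> str:
--     out = ['"']
--     for ch in s:
--         if ch == "\\":
--             out.append("\\\\")
--         elif ch == '"':
--             out.append('\\"')
--         elif ch == "\n":
--             out.append("\\n")
--         elif ch == "\r":
--             out.append("\\r")
--         elif ch == "\t":
--             out.append("\\t")
--         elif ord(ch) < 0x20 or ord(ch) == 0x7F:
--             out.append(f"\\x{ord(ch):02x};")
--         else:
--             out.append(ch)
--     out.append('"')
--     return "".join(out)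
-- ===== SOURCE B (Python) =====
-- # B: run-based scanner — copies maximal runs of safe characters wholesale as slices
-- # and escapes only the boundary character, instead of classifying every character.
--
-- def _needs_escape(ch):
--     o = ord(ch)
--     return ch == "\\" or ch == '"' or o < 0x20 or o == 0x7F
--
--
-- def _escape(ch):
--     if ch == "\\":
--         return "\\\\"
--     if ch == '"':
--         return '\\"'
--     if ch == "\n":
--         return "\\n"
--     if ch == "\r":
--         return "\\r"
--     if ch == "\t":
--         return "\\t"
--     return f"\\x{ord(ch):02x};"
--
--
-- def _emit_string(s: str) -> str:
--     parts = ['"']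
--     n = len(s)
--     i = 0
--     while i < n:
--         j = i
--         while j < n and not _needs_escape(s[j]):
--             j += 1
--         parts.append(s[i:j])
--         if j < n:
--             parts.append(_escape(s[j]))
--             j += 1
--         i = j
--     parts.append('"')
--     return "".join(parts)
-- ===== Notes on version B (the rewrite author's own statement) =====
-- stated objective: alternative
-- what changed: Replaced the per-character classify-and-emit loop with a run-based scanner that finds maximal runs of safe characters, appends each run wholesale as one slice, and escapes only the boundary character.
import Mathlib
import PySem

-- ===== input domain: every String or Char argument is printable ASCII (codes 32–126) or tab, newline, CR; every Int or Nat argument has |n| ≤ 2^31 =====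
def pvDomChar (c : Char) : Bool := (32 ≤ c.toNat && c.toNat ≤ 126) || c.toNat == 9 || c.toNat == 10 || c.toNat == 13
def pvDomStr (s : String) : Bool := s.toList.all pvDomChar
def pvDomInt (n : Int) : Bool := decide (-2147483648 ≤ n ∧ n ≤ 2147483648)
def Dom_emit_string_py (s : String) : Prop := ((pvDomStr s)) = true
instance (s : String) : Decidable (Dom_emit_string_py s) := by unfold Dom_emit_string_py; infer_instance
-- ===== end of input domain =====

-- B replaces A's per-character classify-and-emit loop by a run-based scanner that copies
-- maximal safe runs wholesale and escapes only the boundary character (objective: alternative).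

-- ===== PORT A =====
-- helper: f"\x{n:02x};" for 0 ≤ n < 256 (A only reaches it with n < 0x20 or n = 0x7F)
def pvHexDigit (n : Nat) : Char :=
  if n < 10 then Char.ofNat (48 + n) else Char.ofNat (87 + n)

def pvHexEsc (n : Nat) : String :=
  String.ofList ['\\', 'x', pvHexDigit (n / 16), pvHexDigit (n % 16), ';']

def emit_string_py (s : String) : String :=
  let out : List String := s.toList.foldl (fun out ch =>
    if ch == '\\' then out ++ ["\\\\"]
    else if ch == '"' then out ++ ["\\\""]
    else if ch == '\n' then out ++ ["\\n"]
    else if ch == '\r' then out ++ ["\\r"]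
    else if ch == '\t' then out ++ ["\\t"]
    else if ch.toNat < 0x20 || ch.toNat == 0x7F then out ++ [pvHexEsc ch.toNat]
    else out ++ [String.singleton ch]) ["\""]
  PySem.Str.join "" (out ++ ["\""])

-- ===== PORT B =====
-- Source B's _needs_escape
def pvNeedsEscape (c : Char) : Bool :=
  c == '\\' || c == '"' || decide (c.toNat < 0x20) || c.toNat == 0x7F

-- Source B's _escape
def pvEscape (c : Char) : String :=
  if c == '\\' then "\\\\"
  else if c == '"' then "\\\""
  else if c == '\n' then "\\n"
  else if c == '\r' then "\\r"
  else if c == '\t' then "\\t"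
  else pvHexEsc c.toNat

-- Source B's outer while-loop on the remaining suffix: the inner 'while j < n and not
-- _needs_escape(s[j])' scan is the takeWhile/dropWhile split, the appended slice
-- s[i:j] is the run, then the boundary char (if any) is escaped and the loop continues.
def pvScan (cs : List Char) : List Char :=
  match _h : cs.dropWhile (fun c => !pvNeedsEscape c) with
  | [] => cs.takeWhile (fun c => !pvNeedsEscape c)
  | c :: rest =>
      cs.takeWhile (fun c => !pvNeedsEscape c) ++ (pvEscape c).toList ++ pvScan rest
termination_by cs.length
decreasing_by
  have hle : (cs.dropWhile (fun c => !pvNeedsEscape c)).length ≤ cs.length :=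
    (List.dropWhile_sublist _).length_le
  rw [_h] at hle
  simp at hle
  omega

def emit_string_py_alt (s : String) : String :=
  String.ofList ('"' :: pvScan s.toList ++ ['"'])

-- ===== PRECONDITION & SPEC =====
def Spec_emit_string_py (s : String) (out : String) : Prop := out = emit_string_py_alt s
instance (s : String) (out : String) : Decidable (Spec_emit_string_py s out) := by unfold Spec_emit_string_py; infer_instance

-- ===== CLAIM (what is proved, stated in full; the proofs are below) =====
def Claim_equal_emit_string_py : Prop := ∀ (s : String), Dom_emit_string_py s → Spec_emit_string_py s (emit_string_py s)

-- ===== LEMMAS AND PROOFS =====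

-- A's per-char escape, as a function (the branch A appends for ch)
def pvEscA (ch : Char) : String :=
  if ch == '\\' then "\\\\"
  else if ch == '"' then "\\\""
  else if ch == '\n' then "\\n"
  else if ch == '\r' then "\\r"
  else if ch == '\t' then "\\t"
  else if ch.toNat < 0x20 || ch.toNat == 0x7F then pvHexEsc ch.toNat
  else String.singleton ch


-- per-char agreement: A's branch equals B's "escape if special, else copy"
theorem pvEscA_eq (c : Char) :
    pvEscA c = if pvNeedsEscape c then pvEscape c else String.singleton c := by
  by_cases h92 : c = '\\'
  · subst h92; decide
  · by_cases h34 : c = '"'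
    · subst h34; decide
    · by_cases h10 : c = '\n'
      · subst h10; decide
      · by_cases h13 : c = '\r'
        · subst h13; decide
        · by_cases h9 : c = '\t'
          · subst h9; decide
          · simp only [pvEscA, pvEscape, pvNeedsEscape, beq_iff_eq,
              if_neg h92, if_neg h34, if_neg h10, if_neg h13, if_neg h9,
              Bool.or_eq_true, decide_eq_true_eq]
            by_cases hx : c.toNat < 0x20 ∨ c.toNat = 0x7F
            · rw [if_pos (by tauto), if_pos (by tauto)]
            · rw [if_neg (by tauto), if_neg (by tauto)]

theorem pvFoldl_eq_map (l : List String) (cs : List Char) :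
    cs.foldl (fun out ch =>
      if ch == '\\' then out ++ ["\\\\"]
      else if ch == '"' then out ++ ["\\\""]
      else if ch == '\n' then out ++ ["\\n"]
      else if ch == '\r' then out ++ ["\\r"]
      else if ch == '\t' then out ++ ["\\t"]
      else if ch.toNat < 0x20 || ch.toNat == 0x7F then out ++ [pvHexEsc ch.toNat]
      else out ++ [String.singleton ch]) l = l ++ cs.map pvEscA := by
  have hf : (fun (out : List String) ch =>
      if ch == '\\' then out ++ ["\\\\"]
      else if ch == '"' then out ++ ["\\\""]
      else if ch == '\n' then out ++ ["\\n"]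
      else if ch == '\r' then out ++ ["\\r"]
      else if ch == '\t' then out ++ ["\\t"]
      else if ch.toNat < 0x20 || ch.toNat == 0x7F then out ++ [pvHexEsc ch.toNat]
      else out ++ [String.singleton ch]) = fun out ch => out ++ [pvEscA ch] := by
    funext out ch
    simp only [pvEscA]
    split_ifs <;> rfl
  rw [hf, PySem.List.foldl_append_singleton_eq_map]

theorem pvJoin_empty_flatten (ps : List (List Char)) :
    PySem.Chars.join [] ps = ps.flatten := by
  induction ps with
  | nil => simp [PySem.Chars.join_nil]
  | cons p qs ih =>
    cases qs with
    | nil => simp [PySem.Chars.join_singleton]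
    | cons q rest =>
      rw [PySem.Chars.join_cons_cons, ih]
      simp

-- unfolding equations for pvScan
theorem pvScan_nil : pvScan [] = [] := by
  simp [pvScan]

theorem pvScan_cons_safe (c : Char) (tl : List Char) (h : pvNeedsEscape c = false) :
    pvScan (c :: tl) = c :: pvScan tl := by
  have hd : (c :: tl).dropWhile (fun x => !pvNeedsEscape x)
      = tl.dropWhile (fun x => !pvNeedsEscape x) := by
    simp [h]
  have ht : (c :: tl).takeWhile (fun x => !pvNeedsEscape x)
      = c :: tl.takeWhile (fun x => !pvNeedsEscape x) := by
    simp [h]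
  rw [pvScan]
  conv_rhs => rw [pvScan]
  split <;> rename_i heq <;> rw [hd] at heq <;> rw [ht] <;> split <;> rename_i heq2 <;>
    rw [heq] at heq2
  all_goals simp_all

theorem pvScan_cons_special (c : Char) (tl : List Char) (h : pvNeedsEscape c = true) :
    pvScan (c :: tl) = (pvEscape c).toList ++ pvScan tl := by
  rw [pvScan]
  split
  · rename_i heq
    simp [h] at heq
  · rename_i c' rest heq
    simp only [List.dropWhile_cons, h, Bool.not_true, Bool.false_eq_true, if_false] at heq
    injection heq with h1 h2
    subst h1; subst h2
    simp [h]

-- B's scanner equals the per-char flatten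
theorem pvScan_eq_flatten (cs : List Char) :
    pvScan cs = (cs.map fun c => (pvEscA c).toList).flatten := by
  induction cs with
  | nil => simp [pvScan_nil]
  | cons c tl ih =>
    by_cases h : pvNeedsEscape c = true
    · rw [pvScan_cons_special c tl h]
      simp [pvEscA_eq, h, ih]
    · rw [pvScan_cons_safe c tl (by simpa using h)]
      simp only [Bool.not_eq_true] at h
      simp [pvEscA_eq, h, ih, String.singleton]

-- ===== VERDICT (by name: the statement is the Claim_ definition above) =====
theorem emit_string_py_spec : Claim_equal_emit_string_py := by
  intro s hdom
  unfold Spec_emit_string_py emit_string_py emit_string_py_alt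
  rw [pvFoldl_eq_map]
  apply String.toList_inj.mp
  rw [PySem.Str.toList_join]
  simp only [List.map_append, List.map_map, List.map_cons, List.map_nil]
  rw [show ("" : String).toList = ([] : List Char) from rfl, pvJoin_empty_flatten]
  simp only [List.flatten_append, List.flatten_cons, List.flatten_nil, List.append_nil]
  rw [pvScan_eq_flatten, show ("\"" : String).toList = ['"'] from by decide]
  simp [String.toList_ofList, Function.comp_def]
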